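-- pv_equiv track=rewrite | github.com/pinterest/querybook | querybook/server/lib/query_analysis/validation/validators/optimizing_validator.py | opcodes_to_lines
-- ===== SOURCE A (Python) =====
-- from typing import List, Tuple, Callable, Optional
--
-- def opcodes_to_lines(
--     opcodes: List[Tuple], original_string: str
-- ) -> Tuple[Tuple[int, int]]:
--     """
--     Determine in the original which line and character in the line
--     each opcode starts
--     """
--     newline_positions = (
--         [0]
--         + [i for i, c in enumerate(original_string) if c == "\n"]
--         + [
--             len(original_string) + 1,
--         ]
--     )
--
--     results = []
--
--     for o in opcodes:
--         i1_line = [i for i, l in enumerate(newline_positions) if o[1] < l][0] - 1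
--         i1_chr = o[1] - newline_positions[i1_line]
--         results.append(((i1_line, i1_chr)))
--
--     return results
-- ===== SOURCE B (Python) =====
-- def opcodes_to_lines(opcodes, original_string):
--     """
--     Determine in the original which line and character in the line
--     each opcode starts
--     """
--     newline_positions = (
--         [0]
--         + [i for i, c in enumerate(original_string) if c == "\n"]
--         + [len(original_string) + 1]
--     )
--
--     results = []
--     for o in opcodes:
--         # binary search: first index with o[1] < newline_positions[index]
--         lo, hi = 0, len(newline_positions)
--         while lo < hi:
--             mid = (lo + hi) // 2
--             if o[1] < newline_positions[mid]:
--                 hi = mid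
--             else:
--                 lo = mid + 1
--         i1_line = lo - 1
--         results.append((i1_line, o[1] - newline_positions[i1_line]))
--
--     return results
-- ===== Notes on version B (the rewrite author's own statement) =====
-- stated objective: alternative
-- what changed: B finds each opcode's line with a hand-written binary search over the nondecreasing newline_positions list instead of A's first-match linear scan (filtered enumerate comprehension indexed at [0]).
import Mathlib
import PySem

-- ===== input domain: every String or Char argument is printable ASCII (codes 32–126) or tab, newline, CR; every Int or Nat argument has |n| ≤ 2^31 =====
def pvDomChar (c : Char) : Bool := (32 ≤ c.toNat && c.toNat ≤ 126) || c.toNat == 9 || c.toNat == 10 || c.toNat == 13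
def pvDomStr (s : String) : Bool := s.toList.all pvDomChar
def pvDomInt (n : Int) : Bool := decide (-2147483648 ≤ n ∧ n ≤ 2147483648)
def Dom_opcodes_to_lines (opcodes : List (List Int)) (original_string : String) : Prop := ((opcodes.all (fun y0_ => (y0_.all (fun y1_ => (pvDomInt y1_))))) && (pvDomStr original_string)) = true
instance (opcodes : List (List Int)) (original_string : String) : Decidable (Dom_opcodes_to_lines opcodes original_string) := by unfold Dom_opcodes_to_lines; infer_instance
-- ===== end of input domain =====

-- B finds each opcode's line by a hand-written binary search over the nondecreasing
-- newline_positions list instead of A's first-match linear scan; return value only.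

-- ===== PORT A =====
-- newline_positions: the same Python expression opens both A and B
def pvNewlinePositions (original_string : String) : List Int :=
  [0]
    ++ ((PySem.List.enumerate original_string.toList 0).filter
          (fun p => p.2 == '\n')).map (fun p => p.1)
    ++ [(original_string.toList.length : Int) + 1]

def opcodes_to_lines (opcodes : List (List Int)) (original_string : String) : List (Int × Int) :=
  let newline_positions := pvNewlinePositions original_string
  opcodes.foldl (fun results o =>
    let ov := PySem.List.pyGetD o 1 0  -- o[1]; in range under Pre_
    -- [i for i, l in enumerate(newline_positions) if o[1] < l][0]; nonempty under Pre_
    let i1_line : Int :=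
      PySem.List.pyGetD
        (((PySem.List.enumerate newline_positions 0).filter
            (fun p => decide (ov < p.2))).map (fun p => p.1)) 0 0 - 1
    let i1_chr := ov - PySem.List.pyGetD newline_positions i1_line 0
    results ++ [(i1_line, i1_chr)]) []

-- ===== PORT B =====
-- the while loop 'while lo < hi: mid = (lo+hi)//2; if o[1] < a[mid]: hi = mid else: lo = mid+1'
-- ported with a fuel bound (hi - lo shrinks each step, so fuel = initial hi suffices)
def pvBisect (a : List Int) (x : Int) : Nat → Nat → Nat → Nat
  | 0, lo, _ => lo
  | fuel + 1, lo, hi =>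
    if lo < hi then
      let mid := (lo + hi) / 2
      if x < a.getD mid 0 then pvBisect a x fuel lo mid
      else pvBisect a x fuel (mid + 1) hi
    else lo

def opcodes_to_lines_alt (opcodes : List (List Int)) (original_string : String) : List (Int × Int) :=
  let newline_positions := pvNewlinePositions original_string
  opcodes.foldl (fun results o =>
    let ov := PySem.List.pyGetD o 1 0  -- o[1]; in range under Pre_
    let i1_line : Int :=
      (pvBisect newline_positions ov newline_positions.length 0 newline_positions.length : Int) - 1
    results ++ [(i1_line, ov - PySem.List.pyGetD newline_positions i1_line 0)]) []

-- ===== PRECONDITION & SPEC =====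
-- Pre_ excludes exactly the inputs on which the Python A raises IndexError: an opcode
-- shorter than 2 (o[1] fails, in A and B alike) or one with o[1] > len(original_string)
-- (A's inner comprehension is empty, so its [0] fails).
def Pre_opcodes_to_lines (opcodes : List (List Int)) (original_string : String) : Prop :=
  ∀ o ∈ opcodes, 2 ≤ o.length ∧ PySem.List.pyGetD o 1 0 ≤ (original_string.toList.length : Int)
instance (opcodes : List (List Int)) (original_string : String) : Decidable (Pre_opcodes_to_lines opcodes original_string) := by unfold Pre_opcodes_to_lines; infer_instance

def pvWitness_opcodes_to_lines : List (List Int) × String := ([[0, 0], [2, 4]], "ab\ncd")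

def Spec_opcodes_to_lines (opcodes : List (List Int)) (original_string : String) (out : List (Int × Int)) : Prop := out = opcodes_to_lines_alt opcodes original_string
instance (opcodes : List (List Int)) (original_string : String) (out : List (Int × Int)) : Decidable (Spec_opcodes_to_lines opcodes original_string out) := by unfold Spec_opcodes_to_lines; infer_instance

-- ===== CLAIM (what is proved, stated in full; the proofs are below) =====
def Claim_equal_opcodes_to_lines : Prop := ∀ (opcodes : List (List Int)) (original_string : String), Dom_opcodes_to_lines opcodes original_string → Pre_opcodes_to_lines opcodes original_string → Spec_opcodes_to_lines opcodes original_string (opcodes_to_lines opcodes original_string)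

-- ===== LEMMAS AND PROOFS =====

-- the binary search returns a split point: everything before it is ≤ x, everything from it on is > x
theorem pvBisect_spec (a : List Int) (x : Int) (hs : a.Pairwise (· ≤ ·)) :
    ∀ (fuel lo hi : Nat), hi - lo ≤ fuel → lo ≤ hi → hi ≤ a.length →
      (∀ i, i < lo → a.getD i 0 ≤ x) →
      (∀ i, hi ≤ i → i < a.length → x < a.getD i 0) →
      (∀ i, i < pvBisect a x fuel lo hi → a.getD i 0 ≤ x) ∧
        pvBisect a x fuel lo hi ≤ a.length ∧
        (∀ i, pvBisect a x fuel lo hi ≤ i → i < a.length → x < a.getD i 0) := by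
  have hmono : ∀ i j, i ≤ j → j < a.length → a.getD i 0 ≤ a.getD j 0 := by
    intro i j hij hj
    rcases eq_or_lt_of_le hij with h | h
    · subst h; exact le_refl _
    · rw [List.getD_eq_getElem a 0 (by omega), List.getD_eq_getElem a 0 hj]
      exact (List.pairwise_iff_getElem.mp hs) i j (by omega) hj h
  intro fuel
  induction fuel with
  | zero =>
    intro lo hi hf hle hhi hlo hh
    have : lo = hi := by omega
    subst this
    simp only [pvBisect]
    exact ⟨fun i hi' => hlo i hi', by omega, fun i h1 h2 => hh i h1 h2⟩
  | succ fuel ih =>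
    intro lo hi hf hle hhi hlo hh
    by_cases hlh : lo < hi
    · simp only [pvBisect, hlh, if_true]
      set mid := (lo + hi) / 2 with hmid
      have hm1 : lo ≤ mid := by omega
      have hm2 : mid < hi := by omega
      by_cases hx : x < a.getD mid 0
      · simp only [hx, if_true]
        exact ih lo mid (by omega) (by omega) (by omega) hlo
          (fun i h1 h2 => lt_of_lt_of_le hx (hmono mid i h1 h2))
      · simp only [hx, if_false]
        rw [Int.not_lt] at hx
        exact ih (mid + 1) hi (by omega) (by omega) hhi
          (fun i h1 => by
            rcases lt_or_ge i lo with h | h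
            · exact hlo i h
            · exact le_trans (hmono i mid (by omega) (by omega)) hx)
          hh
    · simp only [pvBisect, hlh, if_false]
      exact ⟨fun i hi' => hlo i hi', by omega, fun i h1 h2 => hh i (by omega) h2⟩

-- first element of the filtered enumeration is the first index whose value exceeds x
theorem head_filter_enumerate (x : Int) :
    ∀ (a : List Int) (s : Int) (r : Nat) (hr : r < a.length),
      (∀ i (h : i < a.length), i < r → ¬ x < a[i]) → x < a[r] →
      ((PySem.List.enumerate a s).filter (fun p => decide (x < p.2))).head? =
        some (s + r, a[r]) := by
  intro a
  induction a with
  | nil => intro s r hr; exact absurd hr (by simp)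
  | cons b t ih =>
    intro s r hr h1 h2
    rw [PySem.List.enumerate_cons]
    cases r with
    | zero =>
      have : x < b := h2
      simp [this]
    | succ r' =>
      have hb : ¬ x < b := h1 0 (by simp) (by omega)
      have := ih (s + 1) r' (by simpa using hr)
        (fun i h hlt => by simpa using h1 (i + 1) (by simpa using h) (by omega))
        (by simpa using h2)
      rw [List.filter_cons]
      simp only [hb, decide_false, Bool.false_eq_true, if_false]
      rw [this, List.getElem_cons_succ]
      congr 2
      push_cast
      ring

-- membership in the middle segment of newline_positions
theorem mids_mem (s : String) (m : Int)
    (hm : m ∈ ((PySem.List.enumerate s.toList 0).filter (fun p => p.2 == '\n')).map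
        (fun p => p.1)) :
    0 ≤ m ∧ m < (s.toList.length : Int) := by
  obtain ⟨p, hp, rfl⟩ := List.mem_map.mp hm
  have hpe := (List.mem_filter.mp hp).1
  obtain ⟨k, hk, rfl⟩ := (PySem.List.mem_enumerate_iff _ _ _).mp hpe
  refine ⟨by simp, ?_⟩
  simp at hk ⊢
  omega

theorem mids_pairwise (s : String) :
    (((PySem.List.enumerate s.toList 0).filter (fun p => p.2 == '\n')).map
        (fun p => p.1)).Pairwise (· < ·) := by
  apply List.pairwise_map.mpr
  exact ((PySem.List.pairwise_lt_enumerate s.toList 0).filter _).imp (fun h => h)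

theorem nl_pairwise (s : String) : (pvNewlinePositions s).Pairwise (· ≤ ·) := by
  unfold pvNewlinePositions
  rw [List.append_assoc, List.singleton_append, List.pairwise_cons]
  constructor
  · intro m hm
    rcases List.mem_append.mp hm with h | h
    · exact (mids_mem s m h).1
    · simp at h; omega
  · rw [List.pairwise_append]
    refine ⟨(mids_pairwise s).imp (fun h => le_of_lt h), by simp, ?_⟩
    intro m hm y hy
    simp at hy; subst hy
    have := (mids_mem s m hm).2
    have hts : s.toList.length = s.length := by simp
    omega

theorem getD_last_append (pre : List Int) (x : Int) :
    (pre ++ [x]).getD ((pre ++ [x]).length - 1) 0 = x := by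
  simp [List.getD_eq_getElem?_getD]

theorem nl_last (s : String) :
    (pvNewlinePositions s).getD ((pvNewlinePositions s).length - 1) 0 =
      (s.toList.length : Int) + 1 := by
  unfold pvNewlinePositions
  exact getD_last_append _ _

theorem nl_len (s : String) : 2 ≤ (pvNewlinePositions s).length := by
  unfold pvNewlinePositions; simp

-- the per-opcode line index: A's first-match scan equals B's binary search
theorem per_o (s : String) (ov : Int) (hov : ov ≤ (s.toList.length : Int)) :
    PySem.List.pyGetD
        (((PySem.List.enumerate (pvNewlinePositions s) 0).filter
            (fun p => decide (ov < p.2))).map (fun p => p.1)) 0 0 =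
      (pvBisect (pvNewlinePositions s) ov (pvNewlinePositions s).length 0
        (pvNewlinePositions s).length : Int) := by
  set nl := pvNewlinePositions s with hnl
  set r := pvBisect nl ov nl.length 0 nl.length with hr
  obtain ⟨h1, h2, h3⟩ := pvBisect_spec nl ov (nl_pairwise s) nl.length 0 nl.length
    (Nat.sub_le _ _) (Nat.zero_le _) (le_refl _)
    (fun i h => absurd h (Nat.not_lt_zero i))
    (fun i hge hlt => absurd hlt (Nat.not_lt.mpr hge))
  rw [← hr] at h1 h2 h3
  have hlen : 2 ≤ nl.length := by rw [hnl]; exact nl_len s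
  have hrlt : r < nl.length := by
    by_contra hcon
    have heq : nl.length - 1 < r := by omega
    have hlast := h1 (nl.length - 1) heq
    rw [hnl, nl_last s] at hlast
    omega
  have hx : ov < nl[r] := by
    have := h3 r (le_refl r) hrlt
    rwa [List.getD_eq_getElem nl 0 hrlt] at this
  have hno : ∀ i (h : i < nl.length), i < r → ¬ ov < nl[i] := by
    intro i h hlt
    have := h1 i hlt
    rw [List.getD_eq_getElem nl 0 h] at this
    omega
  have hh := head_filter_enumerate ov nl 0 r hrlt hno hx
  rw [PySem.List.pyGetD_zero, List.getD_eq_getElem?_getD, ← List.head?_eq_getElem?,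
    List.head?_map, hh]
  simp

-- ===== VERDICT (by name: the statement is the Claim_ definition above) =====
theorem opcodes_to_lines_spec : Claim_equal_opcodes_to_lines := by
  intro opcodes s _ hpre
  unfold Spec_opcodes_to_lines opcodes_to_lines opcodes_to_lines_alt
  apply PySem.List.foldl_congr_mem
  intro acc o ho
  have hov := (hpre o ho).2
  simp only
  rw [per_o s _ hov]
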